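-- pv_equiv track=rewrite | github.com/GSofoyan/examen-a-d | A&D Ex,files,sets,trup,dict/Dubbels.py | dubbels
-- ===== SOURCE A (Python) =====
-- def dubbels(lijst):
--    bekeken =[]
--    enkel= set()
--    meerder= set()
--    for x in lijst:
--        if x in meerder:     #als het al in meerdere zit(komt 3e keer voor), is het al uit enkel en zal line 19 crash geven als we niet skippen
--            continue
--        if x in bekeken:     #het is al een gepasseerd (1 keer), dus uit enkel en in meerder
--            meerder.add(x)
--            enkel.remove(x)
--        else:
--            bekeken.append(x)
--            enkel.add(x)
--
--    return enkel,meerder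
-- ===== SOURCE B (Python) =====
-- def dubbels(lijst):
--     meerder = {x for i, x in enumerate(lijst) if x in lijst[:i]}
--     enkel = set(lijst) - meerder
--     return enkel, meerder
-- ===== Notes on version B (the rewrite author's own statement) =====
-- stated objective: simpler
-- what changed: A's single online loop that moves elements between three mutable collections (bekeken/enkel/meerder with re-sighting branches and a continue guard) is replaced by two declarative set comprehensions: meerder = elements that already occurred earlier in the list, enkel = set(lijst) - meerder.
import Mathlib
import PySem

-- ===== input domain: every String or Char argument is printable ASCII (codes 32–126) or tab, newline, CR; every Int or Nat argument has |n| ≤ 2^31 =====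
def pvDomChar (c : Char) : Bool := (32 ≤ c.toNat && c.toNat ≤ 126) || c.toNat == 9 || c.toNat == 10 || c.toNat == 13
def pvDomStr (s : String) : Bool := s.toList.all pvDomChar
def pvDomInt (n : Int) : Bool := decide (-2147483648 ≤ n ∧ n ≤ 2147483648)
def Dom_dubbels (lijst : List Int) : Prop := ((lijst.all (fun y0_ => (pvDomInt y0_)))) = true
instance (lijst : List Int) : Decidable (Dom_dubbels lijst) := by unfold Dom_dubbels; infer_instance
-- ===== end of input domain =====

-- B replaces A's online move-between-sets bookkeeping (with its re-sighting branches) by two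
-- declarative set comprehensions: duplicates are the elements already seen earlier in the list,
-- singles are set(lijst) minus the duplicates (objective: simpler; same quadratic cost as A).

-- ===== PORT A =====
-- loop body of A's for-loop; enkel.remove(x) is ported as remove? with getD: in that branch
-- x ∈ bekeken and x ∉ meerder, so x ∈ enkel and the KeyError arm is unreachable (A is total)
def dubbelsStep (acc : List Int × PySem.Set Int × PySem.Set Int) (x : Int) :
    List Int × PySem.Set Int × PySem.Set Int :=
  if PySem.Set.contains acc.2.2 x then acc         -- if x in meerder: continue
  else if acc.1.contains x then                    -- if x in bekeken
    (acc.1, (PySem.Set.remove? acc.2.1 x).getD acc.2.1, PySem.Set.add acc.2.2 x)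
  else
    (acc.1 ++ [x], PySem.Set.add acc.2.1 x, acc.2.2)

def dubbels (lijst : List Int) : List Int × List Int :=
  let st := lijst.foldl dubbelsStep ([], PySem.Set.empty, PySem.Set.empty)
  (st.2.1, st.2.2)

-- ===== PORT B =====
def dubbels_alt (lijst : List Int) : List Int × List Int :=
  let meerder : PySem.Set Int := PySem.Set.ofList
    (((PySem.List.enumerate lijst).filter
        (fun p => (PySem.List.slice lijst none (some p.1)).contains p.2)).map Prod.snd)
  let enkel : PySem.Set Int := PySem.Set.diff (PySem.Set.ofList lijst) meerder
  (enkel, meerder)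

-- ===== PRECONDITION & SPEC =====
def Spec_dubbels (lijst : List Int) (out : List Int × List Int) : Prop := out = dubbels_alt lijst
instance (lijst : List Int) (out : List Int × List Int) : Decidable (Spec_dubbels lijst out) := by unfold Spec_dubbels; infer_instance

-- ===== CLAIM (what is proved, stated in full; the proofs are below) =====
def Claim_equal_dubbels : Prop := ∀ (lijst : List Int), Dom_dubbels lijst → Spec_dubbels lijst (dubbels lijst)

-- ===== LEMMAS AND PROOFS =====

-- elements of p that have already occurred in seen ++ (the prefix of p before them), in order
def pvDups (seen : List Int) : List Int → List Int
  | [] => []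
  | x :: xs => (if seen.contains x then [x] else []) ++ pvDups (seen ++ [x]) xs

def pvOnes (p : List Int) : List Int :=
  (PySem.Set.ofList p).filter (fun y => p.count y == 1)

def pvState (p : List Int) : List Int × PySem.Set Int × PySem.Set Int :=
  (PySem.Set.ofList p, pvOnes p, PySem.Set.ofList (pvDups [] p))

lemma mem_pvDups (seen p : List Int) (y : Int) :
    y ∈ pvDups seen p ↔ y ∈ p ∧ 2 ≤ seen.count y + p.count y := by
  induction p generalizing seen with
  | nil => simp [pvDups]
  | cons x xs ih =>
    have hyxs : y ∈ xs ↔ 1 ≤ xs.count y := (List.count_pos_iff).symm.trans (by omega)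
    simp only [pvDups, List.mem_append, ih, List.count_append, List.count_cons,
      List.mem_cons, List.count_nil]
    by_cases hxy : y = x
    · subst hxy
      by_cases hs : y ∈ seen
      · have h1 : 1 ≤ seen.count y := List.count_pos_iff.mpr hs
        have hc : seen.contains y = true := by simpa using hs
        simp only [hc, if_pos, List.mem_singleton, beq_self_eq_true, true_or, true_and]
        simp only [true_iff]
        omega
      · have h0 : seen.count y = 0 := List.count_eq_zero.mpr hs
        have hc : seen.contains y = false := by simpa using hs
        simp only [hc, Bool.false_eq_true, if_false, List.not_mem_nil, false_or,
          beq_self_eq_true, if_true, true_or, true_and]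
        simp only [hyxs]
        omega
    · have hxy' : (x == y) = false := by simp [beq_eq_false_iff_ne]; exact fun h => hxy h.symm
      by_cases hs : x ∈ seen
      · have hc : seen.contains x = true := by simpa using hs
        simp [hxy', hxy]
      · have hc : seen.contains x = false := by simpa using hs
        simp [hxy', hxy]

lemma pvDups_append (seen p : List Int) (x : Int) :
    pvDups seen (p ++ [x]) = pvDups seen p ++ (if (seen ++ p).contains x then [x] else []) := by
  induction p generalizing seen with
  | nil => simp [pvDups]
  | cons z zs ih =>
    simp only [List.cons_append, pvDups, ih, List.append_assoc]
    simp only [List.nil_append]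
    rfl

lemma ofList_append_singleton (p : List Int) (x : Int) :
    PySem.Set.ofList (p ++ [x]) = PySem.Set.add (PySem.Set.ofList p) x := by
  simp [PySem.Set.ofList_eq_foldl, List.foldl_append]

lemma pvStep_state (p : List Int) (x : Int) :
    dubbelsStep (pvState p) x = pvState (p ++ [x]) := by
  have hd : x ∈ pvDups [] p ↔ 2 ≤ p.count x := by
    rw [mem_pvDups]
    simp only [List.count_nil, Nat.zero_add]
    constructor
    · exact fun h => h.2
    · exact fun h => ⟨List.count_pos_iff.mp (by omega), h⟩
  have hdApp := pvDups_append [] p x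
  simp only [List.nil_append] at hdApp
  simp only [dubbelsStep, pvState]
  by_cases h2 : 2 ≤ p.count x
  · -- x already in meerder: the whole state is unchanged
    have hxp : x ∈ p := List.count_pos_iff.mp (by omega)
    have hcond : PySem.Set.contains (PySem.Set.ofList (pvDups [] p)) x = true := by
      simp [PySem.Set.contains, List.contains_eq_mem, PySem.Set.mem_ofList, hd.mpr h2]
    have c1 : PySem.Set.ofList (p ++ [x]) = PySem.Set.ofList p := by
      rw [ofList_append_singleton]
      simp [PySem.Set.add, PySem.Set.contains, List.contains_eq_mem, PySem.Set.mem_ofList, hxp]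
    have c3 : PySem.Set.ofList (pvDups [] (p ++ [x])) = PySem.Set.ofList (pvDups [] p) := by
      rw [hdApp, if_pos (by simpa [List.contains_eq_mem] using hxp), ofList_append_singleton]
      simp [PySem.Set.add, PySem.Set.contains, List.contains_eq_mem, PySem.Set.mem_ofList,
        hd.mpr h2]
    have c2 : pvOnes (p ++ [x]) = pvOnes p := by
      unfold pvOnes
      rw [c1]
      apply List.filter_congr
      intro y hy
      rw [Bool.eq_iff_iff]
      simp only [beq_iff_eq, List.count_append, List.count_cons, List.count_nil]
      by_cases hxy : x = y
      · subst hxy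
        simp only [if_true]
        omega
      · simp [hxy]
    simp only [hcond, if_true, c1, c2, c3]
  · by_cases hxp : x ∈ p
    · -- second sighting: x moves from enkel to meerder
      have hc1 : p.count x = 1 := by
        have := List.count_pos_iff.mpr hxp; omega
      have hcond : PySem.Set.contains (PySem.Set.ofList (pvDups [] p)) x = false := by
        simp [PySem.Set.contains, List.contains_eq_mem, PySem.Set.mem_ofList, hd]
        omega
      have hbek : List.contains (PySem.Set.ofList p) x = true := by
        simp [List.contains_eq_mem, PySem.Set.mem_ofList, hxp]
      have c1 : PySem.Set.ofList (p ++ [x]) = PySem.Set.ofList p := by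
        rw [ofList_append_singleton]
        simp [PySem.Set.add, PySem.Set.contains, List.contains_eq_mem, PySem.Set.mem_ofList, hxp]
      have c3 : PySem.Set.ofList (pvDups [] (p ++ [x]))
          = PySem.Set.add (PySem.Set.ofList (pvDups [] p)) x := by
        rw [hdApp, if_pos (by simpa [List.contains_eq_mem] using hxp), ofList_append_singleton]
      have hmem : x ∈ pvOnes p := by
        unfold pvOnes
        rw [List.mem_filter]
        exact ⟨(PySem.Set.mem_ofList p x).mpr hxp, by simp [hc1]⟩
      have c2 : (PySem.Set.remove? (pvOnes p) x).getD (pvOnes p) = pvOnes (p ++ [x]) := by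
        rw [PySem.Set.remove?_of_mem hmem, Option.getD_some]
        unfold PySem.Set.discard pvOnes
        rw [List.filter_filter, c1]
        apply List.filter_congr
        intro y hy
        rw [Bool.eq_iff_iff]
        simp only [Bool.and_eq_true, beq_iff_eq, Bool.not_eq_eq_eq_not, Bool.not_true,
          List.count_append, List.count_cons, List.count_nil]
        by_cases hxy : y = x
        · subst hxy
          simp [hc1]
        · have hb : (y == x) = false := beq_eq_false_iff_ne.mpr hxy
          have hxy' : ¬ x = y := fun h => hxy h.symm
          simp [hb, hxy']
      simp only [hcond, Bool.false_eq_true, if_false]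
      rw [if_pos hbek, c2, c1, c3]
    · -- first sighting: x goes to bekeken and enkel
      have hc0 : p.count x = 0 := List.count_eq_zero.mpr hxp
      have hcond : PySem.Set.contains (PySem.Set.ofList (pvDups [] p)) x = false := by
        simp [PySem.Set.contains, List.contains_eq_mem, PySem.Set.mem_ofList, hd]
        omega
      have hbek : List.contains (PySem.Set.ofList p) x = false := by
        simp [List.contains_eq_mem, PySem.Set.mem_ofList, hxp]
      have c1 : PySem.Set.ofList (p ++ [x]) = PySem.Set.ofList p ++ [x] := by
        rw [ofList_append_singleton]
        simp [PySem.Set.add, PySem.Set.contains, List.contains_eq_mem, PySem.Set.mem_ofList, hxp]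
      have c3 : PySem.Set.ofList (pvDups [] (p ++ [x])) = PySem.Set.ofList (pvDups [] p) := by
        rw [hdApp, if_neg (by simpa [List.contains_eq_mem] using hxp)]
        simp
      have hno : x ∉ pvOnes p := fun h => hxp ((PySem.Set.mem_ofList p x).mp (List.mem_filter.mp h).1)
      have c2 : PySem.Set.add (pvOnes p) x = pvOnes (p ++ [x]) := by
        have hcon : PySem.Set.contains (pvOnes p) x = false := by
          simp [PySem.Set.contains, List.contains_eq_mem, hno]
        unfold PySem.Set.add
        rw [hcon]
        simp only [Bool.false_eq_true, if_false]
        unfold pvOnes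
        rw [c1, List.filter_append]
        have hone : List.filter (fun y => (p ++ [x]).count y == 1) [x] = [x] := by
          simp [List.count_append, List.count_cons, List.count_nil, hc0]
        rw [hone]
        congr 1
        apply List.filter_congr
        intro y hy
        have hyp : y ∈ p := (PySem.Set.mem_ofList p y).mp hy
        have hb : (x == y) = false := beq_eq_false_iff_ne.mpr (fun h => hxp (h ▸ hyp))
        simp [List.count_append, List.count_cons, List.count_nil, hb]
      simp only [hcond, Bool.false_eq_true, if_false]
      rw [if_neg (by rw [hbek]; simp), c1, c2, c3]

lemma pvFold_state (xs pre : List Int) :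
    xs.foldl dubbelsStep (pvState pre) = pvState (pre ++ xs) := by
  induction xs generalizing pre with
  | nil => simp
  | cons x xs ih =>
    rw [List.foldl_cons, pvStep_state, ih, List.append_assoc, List.singleton_append]

lemma pvBridge (xs pre : List Int) :
    (((PySem.List.enumerate xs (pre.length : Int)).filter
        (fun q => (PySem.List.slice (pre ++ xs) none (some q.1)).contains q.2)).map Prod.snd)
      = pvDups pre xs := by
  induction xs generalizing pre with
  | nil => simp [pvDups, PySem.List.enumerate_nil]
  | cons x xs ih =>
    rw [PySem.List.enumerate_cons]
    have harg : ((pre.length : Int) + 1) = (((pre ++ [x]).length : Int)) := by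
      simp
    rw [harg, List.filter_cons]
    have hslice : PySem.List.slice (pre ++ x :: xs) none (some (pre.length : Int)) = pre := by
      rw [PySem.List.slice_to_natCast, List.take_left]
    have ihx := ih (pre ++ [x])
    rw [List.append_assoc, List.singleton_append] at ihx
    by_cases h : pre.contains x
    · simp only [hslice, h, if_pos, List.map_cons, ihx, pvDups, List.singleton_append]
    · simp only [hslice, h, Bool.false_eq_true, if_false, ihx, pvDups, List.nil_append]

lemma pvEnkel (l : List Int) :
    PySem.Set.diff (PySem.Set.ofList l) (PySem.Set.ofList (pvDups [] l)) = pvOnes l := by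
  unfold PySem.Set.diff pvOnes
  apply List.filter_congr
  intro y hy
  have hyl : y ∈ l := (PySem.Set.mem_ofList l y).mp hy
  have h1 : 1 ≤ l.count y := List.count_pos_iff.mpr hyl
  have hd : y ∈ pvDups [] l ↔ 2 ≤ l.count y := by
    rw [mem_pvDups]; simp [hyl]
  by_cases h2 : 2 ≤ l.count y
  · have hne : l.count y ≠ 1 := by omega
    simp [PySem.Set.contains, hd.mpr h2, hne]
  · have hc1 : l.count y = 1 := by omega
    have hnd : y ∉ pvDups [] l := by rw [hd]; omega
    simp [PySem.Set.contains, hnd, hc1]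

-- ===== VERDICT (by name: the statement is the Claim_ definition above) =====
theorem dubbels_spec : Claim_equal_dubbels := by
  intro lijst _
  unfold Spec_dubbels
  have hA : dubbels lijst = (pvOnes lijst, PySem.Set.ofList (pvDups [] lijst)) := by
    have hfold := pvFold_state lijst []
    have hst : pvState ([] : List Int) = ([], PySem.Set.empty, PySem.Set.empty) := rfl
    rw [hst, List.nil_append] at hfold
    simp only [dubbels, hfold, pvState]
  have hB : dubbels_alt lijst = (pvOnes lijst, PySem.Set.ofList (pvDups [] lijst)) := by
    have hbr := pvBridge lijst []
    simp only [List.length_nil, Nat.cast_zero, List.nil_append] at hbr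
    simp only [dubbels_alt, hbr, pvEnkel]
  rw [hA, hB]
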